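-- pv_equiv track=rewrite | github.com/thierhost/calcul-numerique | myfonctions.py | pasJustqDnbres
-- ===== SOURCE A (Python) =====
-- def estNombre(carac):
-- 	if carac in ("0","1","2","3","4","5","6","7","8","9"):
-- 		return 1
-- 	else :
-- 		return 0
--
-- def pasJustqDnbres(chaine):
-- 	for i in range(len(chaine)):
-- 		if i==0:
-- 			if estNombre(chaine[i])==0 and chaine[i] !="-":
-- 				return 1
-- 		else:
-- 			if estNombre(chaine[i])==0:
-- 				return 1
-- 	return 0
-- ===== SOURCE B (Python) =====
-- def pasJustqDnbres(chaine):
--     digits = sum(chaine.count(d) for d in "0123456789")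
--     minus = chaine.count("-")
--     ok = digits + minus == len(chaine) and (minus == 0 or (minus == 1 and chaine.startswith("-")))
--     return 0 if ok else 1
-- ===== Notes on version B (the rewrite author's own statement) =====
-- stated objective: alternative
-- what changed: Replaces A's positional character scan by a global character-frequency characterization: count digit occurrences and '-' occurrences, then accept iff those counts account for the whole string and the minus count is 0, or 1 with the string starting with '-'.
import Mathlib
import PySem

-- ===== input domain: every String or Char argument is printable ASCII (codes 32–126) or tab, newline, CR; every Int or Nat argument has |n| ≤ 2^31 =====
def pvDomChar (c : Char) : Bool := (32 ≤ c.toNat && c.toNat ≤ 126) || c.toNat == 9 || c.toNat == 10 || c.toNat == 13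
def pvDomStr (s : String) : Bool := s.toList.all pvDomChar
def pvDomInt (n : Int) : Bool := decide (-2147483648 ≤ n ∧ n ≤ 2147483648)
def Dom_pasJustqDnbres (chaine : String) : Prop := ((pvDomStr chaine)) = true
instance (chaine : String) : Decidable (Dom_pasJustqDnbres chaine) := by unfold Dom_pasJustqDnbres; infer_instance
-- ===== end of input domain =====

-- B accepts by a global character-frequency characterization (digit count + minus count = length,
-- and minus count 0, or 1 with a leading '-') instead of A's positional scan (objective: alternative).

-- the digit characters (the tuple ("0",…,"9") in A / the string "0123456789" in B, as chars)
def digitChars : List Char := ['0','1','2','3','4','5','6','7','8','9']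

-- ===== PORT A =====
def estNombre (carac : Char) : Int :=
  if carac ∈ digitChars then 1 else 0

-- the for-loop of A: walks the characters, carrying the index i
def pasJustqDnbresGo (cs : List Char) (i : Nat) : Int :=
  match cs with
  | [] => 0
  | c :: rest =>
    if i = 0 then
      if estNombre c = 0 ∧ c ≠ '-' then 1 else pasJustqDnbresGo rest (i+1)
    else
      if estNombre c = 0 then 1 else pasJustqDnbresGo rest (i+1)

def pasJustqDnbres (chaine : String) : Int :=
  pasJustqDnbresGo chaine.toList 0

-- ===== PORT B =====
def pasJustqDnbres_alt (chaine : String) : Int :=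
  let cs := chaine.toList
  let digits := (digitChars.map (fun d => cs.count d)).sum
  let minus := cs.count '-'
  if digits + minus = cs.length ∧ (minus = 0 ∨ (minus = 1 ∧ cs.take 1 = ['-'])) then 0 else 1

-- ===== PRECONDITION & SPEC =====
def Spec_pasJustqDnbres (chaine : String) (out : Int) : Prop := out = pasJustqDnbres_alt chaine
instance (chaine : String) (out : Int) : Decidable (Spec_pasJustqDnbres chaine out) := by unfold Spec_pasJustqDnbres; infer_instance

-- ===== CLAIM (what is proved, stated in full; the proofs are below) =====
def Claim_equal_pasJustqDnbres : Prop := ∀ (chaine : String), Dom_pasJustqDnbres chaine → Spec_pasJustqDnbres chaine (pasJustqDnbres chaine)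

-- ===== LEMMAS AND PROOFS =====
theorem estNombre_eq_zero (c : Char) : estNombre c = 0 ↔ c ∉ digitChars := by
  unfold estNombre; split <;> simp_all

-- from index 1 on, A's loop is exactly the uniform digit scan
theorem go_pos (cs : List Char) (i : Nat) (hi : i ≠ 0) :
    pasJustqDnbresGo cs i = if cs.all (fun c => decide (c ∈ digitChars)) then 0 else 1 := by
  induction cs generalizing i with
  | nil => simp [pasJustqDnbresGo]
  | cons c rest ih =>
    simp only [pasJustqDnbresGo, if_neg hi, List.all_cons]
    rw [ih (i+1) (Nat.succ_ne_zero i)]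
    by_cases hd : c ∈ digitChars
    · have : ¬ estNombre c = 0 := by simp [estNombre_eq_zero, hd]
      simp [this, hd]
    · have : estNombre c = 0 := by simp [estNombre_eq_zero, hd]
      simp [this, hd]

-- one cons step of the total digit count
theorem digitSum_cons (c : Char) (cs : List Char) :
    (digitChars.map (fun d => ((c :: cs).count d))).sum
      = (digitChars.map (fun d => cs.count d)).sum + (if c ∈ digitChars then 1 else 0) := by
  by_cases h : c ∈ digitChars
  · simp only [digitChars, List.mem_cons, List.not_mem_nil, or_false] at h
    rcases h with h|h|h|h|h|h|h|h|h|h <;> subst h <;>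
      simp [digitChars, List.count_cons] <;> omega
  · have h' := h
    simp only [digitChars, List.mem_cons, List.not_mem_nil, or_false, not_or] at h'
    obtain ⟨h0,h1,h2,h3,h4,h5,h6,h7,h8,h9⟩ := h'
    simp [digitChars, List.count_cons, h0,h1,h2,h3,h4,h5,h6,h7,h8,h9]

-- digit count + minus count never exceeds the length
theorem sum_le_len (cs : List Char) :
    (digitChars.map (fun d => cs.count d)).sum + cs.count '-' ≤ cs.length := by
  induction cs with
  | nil => simp [digitChars]
  | cons c rest ih =>
    rw [digitSum_cons, List.count_cons, List.length_cons]
    have hnd : ('-' : Char) ∉ digitChars := by decide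
    by_cases h : c ∈ digitChars
    · have hne : ¬ (c = '-') := by rintro rfl; exact absurd h (by decide)
      simp [h, hne]; omega
    · by_cases hm : c = '-' <;> simp [h, hm, hnd] <;> omega

-- the frequency characterization of "all digits"
theorem sum_eq_iff (cs : List Char) :
    ((digitChars.map (fun d => cs.count d)).sum + cs.count '-' = cs.length
      ∧ cs.count '-' = 0)
    ↔ cs.all (fun c => decide (c ∈ digitChars)) = true := by
  induction cs with
  | nil => simp [digitChars]
  | cons c rest ih =>
    rw [digitSum_cons, List.count_cons, List.length_cons, List.all_cons]
    have hle := sum_le_len rest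
    have hnd : ('-' : Char) ∉ digitChars := by decide
    by_cases hall : rest.all (fun c => decide (c ∈ digitChars)) = true
    · obtain ⟨h1, h2⟩ := ih.mpr hall
      by_cases h : c ∈ digitChars
      · have hne : ¬ (c = '-') := by rintro rfl; exact absurd h (by decide)
        simp [h, hne, hall, h2]; omega
      · by_cases hm : c = '-' <;> simp [h, hm, hnd, hall, h2] <;> omega
    · have hn : ¬ _ := fun hc => hall (ih.mp hc)
      rw [not_and_or] at hn
      by_cases h : c ∈ digitChars
      · have hne : ¬ (c = '-') := by rintro rfl; exact absurd h (by decide)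
        simp [h, hne, hall]
        intro h1; rcases hn with hn | hn <;> omega
      · by_cases hm : c = '-' <;> simp [h, hm, hall] <;>
          (try intro h1) <;> rcases hn with hn | hn <;> omega

-- B's acceptance condition on a nonempty string = "head is digit or '-', tail all digits"
theorem alt_cond (c : Char) (rest : List Char) :
    ((digitChars.map (fun d => ((c :: rest).count d))).sum + (c :: rest).count '-' = (c :: rest).length
      ∧ ((c :: rest).count '-' = 0 ∨ ((c :: rest).count '-' = 1 ∧ (c :: rest).take 1 = ['-'])))
    ↔ ((c ∈ digitChars ∨ c = '-') ∧ rest.all (fun x => decide (x ∈ digitChars)) = true) := by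
  rw [digitSum_cons, List.count_cons, List.length_cons]
  have hle := sum_le_len rest
  have hnd : ('-' : Char) ∉ digitChars := by decide
  by_cases hall : rest.all (fun x => decide (x ∈ digitChars)) = true
  · obtain ⟨h1, h2⟩ := (sum_eq_iff rest).mpr hall
    by_cases hd : c ∈ digitChars
    · have hne : ¬ (c = '-') := by rintro rfl; exact absurd hd (by decide)
      simp [hd, hne, hall, h2]; omega
    · by_cases hm : c = '-' <;> simp [hd, hm, hnd, hall, h2] <;> omega
  · have hn : ¬ _ := fun hc => hall ((sum_eq_iff rest).mp hc)
    rw [not_and_or] at hn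
    by_cases hd : c ∈ digitChars
    · have hne : ¬ (c = '-') := by rintro rfl; exact absurd hd (by decide)
      simp [hd, hne, hall]
      intro h1 h2; rcases hn with hn | hn <;> omega
    · by_cases hm : c = '-' <;> simp [hd, hm, hnd, hall] <;>
        intro h1 h2 <;> rcases hn with hn | hn <;> omega

-- ===== VERDICT (by name: the statement is the Claim_ definition above) =====
theorem pasJustqDnbres_spec : Claim_equal_pasJustqDnbres := by
  intro chaine _
  unfold Spec_pasJustqDnbres pasJustqDnbres pasJustqDnbres_alt
  cases h : chaine.toList with
  | nil => simp [pasJustqDnbresGo, digitChars]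
  | cons c rest =>
    simp only [pasJustqDnbresGo, if_pos trivial]
    rw [if_congr (alt_cond c rest) rfl rfl]
    by_cases hhead : c ∈ digitChars ∨ c = '-'
    · have hz : ¬ (estNombre c = 0 ∧ c ≠ '-') := by
        rintro ⟨h0, hm⟩
        rcases hhead with hd | hd
        · exact absurd ((estNombre_eq_zero c).mp h0) (not_not_intro hd)
        · exact hm hd
      rw [if_neg hz, go_pos rest 1 one_ne_zero]
      by_cases hall : rest.all (fun x => decide (x ∈ digitChars)) = true <;>
        simp [hall, hhead]
    · rw [not_or] at hhead
      obtain ⟨hd, hm⟩ := hhead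
      rw [if_pos ⟨(estNombre_eq_zero c).mpr hd, hm⟩, if_neg (by simp [hd, hm])]
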